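-- pv_equiv track=rewrite | github.com/Theathiestmonk/dronacharya | backend/drive_chatbot_integrator.py | _subjects_match
-- ===== SOURCE A (Python) =====
-- def _subjects_match(timetable_subject: str, requested_subject: str) -> bool:
--     """Check if timetable subject matches the requested subject"""
--     # Normalize both subjects
--     timetable_norm = timetable_subject.lower().strip()
--     requested_norm = requested_subject.lower().strip()
--
--     # Subject mapping for matching variations
--     subject_mapping = {
--         'math': ['math', 'mathematics', 'maths'],
--         'english': ['english'],
--         'science': ['science'],
--         'hindi': ['hindi'],
--         'french': ['french'],
--         'igs': ['igs', 'integrated general studies'],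
--         'social science': ['social science', 'sst', 'social studies'],
--         'history': ['history'],
--         'geography': ['geography'],
--         'economics': ['economics'],
--         'biology': ['biology'],
--         'physics': ['physics'],
--         'chemistry': ['chemistry']
--     }
--
--     # Check if subjects match through mapping
--     for key, variations in subject_mapping.items():
--         if requested_norm in variations and timetable_norm in variations:
--             return True
--
--     # Direct match
--     return timetable_norm == requested_norm
-- ===== SOURCE B (Python) =====
-- # Reverse-lookup index: each variation maps straight to its canonical subject key,
-- # so matching is two dict lookups instead of scanning every key's variation list.
-- _CANON = {
--     'math': 'math', 'mathematics': 'math', 'maths': 'math',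
--     'english': 'english',
--     'science': 'science',
--     'hindi': 'hindi',
--     'french': 'french',
--     'igs': 'igs', 'integrated general studies': 'igs',
--     'social science': 'social science', 'sst': 'social science',
--     'social studies': 'social science',
--     'history': 'history',
--     'geography': 'geography',
--     'economics': 'economics',
--     'biology': 'biology',
--     'physics': 'physics',
--     'chemistry': 'chemistry',
-- }
--
--
-- def _subjects_match(timetable_subject: str, requested_subject: str) -> bool:
--     timetable_norm = timetable_subject.lower().strip()
--     requested_norm = requested_subject.lower().strip()
--     canon_t = _CANON.get(timetable_norm)
--     if canon_t is not None and canon_t == _CANON.get(requested_norm):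
--         return True
--     return timetable_norm == requested_norm
-- ===== Notes on version B (the rewrite author's own statement) =====
-- stated objective: idiomatic
-- what changed: Replaces the per-key scan over the subject mapping with a precomputed reverse-lookup dict from each variation to its canonical key: two constant-time lookups plus the direct-equality fallback.
import Mathlib
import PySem

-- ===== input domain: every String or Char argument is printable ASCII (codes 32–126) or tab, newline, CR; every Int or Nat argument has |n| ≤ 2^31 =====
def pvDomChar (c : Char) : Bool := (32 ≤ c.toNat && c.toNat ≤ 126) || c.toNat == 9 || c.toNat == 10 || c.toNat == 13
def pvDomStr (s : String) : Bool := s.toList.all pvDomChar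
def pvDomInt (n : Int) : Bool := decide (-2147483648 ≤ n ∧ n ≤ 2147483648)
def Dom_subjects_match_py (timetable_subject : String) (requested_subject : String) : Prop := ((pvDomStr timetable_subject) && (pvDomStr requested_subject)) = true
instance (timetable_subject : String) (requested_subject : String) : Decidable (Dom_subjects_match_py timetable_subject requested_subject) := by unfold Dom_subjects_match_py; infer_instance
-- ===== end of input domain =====

-- B replaces A's per-key scan of the subject mapping with a precomputed reverse-lookup
-- dict (variation -> canonical key): two lookups plus the direct-equality fallback (idiomatic).

-- ===== PORT A =====
-- A's literal subject_mapping (dict iterated in insertion order)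
def pvSubjectMapping : List (String × List String) :=
  [ ("math", ["math", "mathematics", "maths"]),
    ("english", ["english"]),
    ("science", ["science"]),
    ("hindi", ["hindi"]),
    ("french", ["french"]),
    ("igs", ["igs", "integrated general studies"]),
    ("social science", ["social science", "sst", "social studies"]),
    ("history", ["history"]),
    ("geography", ["geography"]),
    ("economics", ["economics"]),
    ("biology", ["biology"]),
    ("physics", ["physics"]),
    ("chemistry", ["chemistry"]) ]

-- A's for-loop with early return: scan the mapping; on fall-through, direct comparison
def pvLoopA : List (String × List String) → String → String → Bool
  | [], tn, rn => tn == rn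
  | (_, vs) :: rest, tn, rn =>
      if vs.contains rn && vs.contains tn then true else pvLoopA rest tn rn

def subjects_match_py (timetable_subject : String) (requested_subject : String) : Bool :=
  let timetable_norm := PySem.Str.strip (PySem.Str.lower timetable_subject)
  let requested_norm := PySem.Str.strip (PySem.Str.lower requested_subject)
  pvLoopA pvSubjectMapping timetable_norm requested_norm

-- ===== PORT B =====
-- B's literal reverse-lookup dict: variation -> canonical key
def pvCanon : PySem.Dict String String :=
  PySem.Dict.ofList
    [ ("math", "math"), ("mathematics", "math"), ("maths", "math"),
      ("english", "english"),
      ("science", "science"),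
      ("hindi", "hindi"),
      ("french", "french"),
      ("igs", "igs"), ("integrated general studies", "igs"),
      ("social science", "social science"), ("sst", "social science"),
      ("social studies", "social science"),
      ("history", "history"),
      ("geography", "geography"),
      ("economics", "economics"),
      ("biology", "biology"),
      ("physics", "physics"),
      ("chemistry", "chemistry") ]

def subjects_match_py_alt (timetable_subject : String) (requested_subject : String) : Bool :=
  let timetable_norm := PySem.Str.strip (PySem.Str.lower timetable_subject)
  let requested_norm := PySem.Str.strip (PySem.Str.lower requested_subject)
  (match pvCanon.get? timetable_norm with
   | some canon_t => pvCanon.get? requested_norm == some canon_t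
   | none => false) || timetable_norm == requested_norm

-- ===== PRECONDITION & SPEC =====
def Spec_subjects_match_py (timetable_subject : String) (requested_subject : String) (out : Bool) : Prop := out = subjects_match_py_alt timetable_subject requested_subject
instance (timetable_subject : String) (requested_subject : String) (out : Bool) : Decidable (Spec_subjects_match_py timetable_subject requested_subject out) := by unfold Spec_subjects_match_py; infer_instance

-- ===== CLAIM (what is proved, stated in full; the proofs are below) =====
def Claim_equal_subjects_match_py : Prop := ∀ (timetable_subject : String) (requested_subject : String), Dom_subjects_match_py timetable_subject requested_subject → Spec_subjects_match_py timetable_subject requested_subject (subjects_match_py timetable_subject requested_subject)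

-- ===== LEMMAS AND PROOFS =====

-- first-match association lookup (what Dict.get? does on a literal items list)
def pvAlook : List (String × String) → String → Option String
  | [], _ => none
  | (a, b) :: rest, x => if a == x then some b else pvAlook rest x

-- flatten a mapping into (variation, key) pairs, in order
def pvFlat (m : List (String × List String)) : List (String × String) :=
  m.flatMap (fun kv => kv.2.map (fun v => (v, kv.1)))

theorem pvFlat_cons (k : String) (vs : List String) (rest : List (String × List String)) :
    pvFlat ((k, vs) :: rest) = vs.map (fun v => (v, k)) ++ pvFlat rest := rfl

theorem pvGet?_eq_alook (l : List (String × String)) (x : String) :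
    (PySem.Dict.mk l).get? x = pvAlook l x := by
  induction l with
  | nil => simp [PySem.Dict.get?, pvAlook]
  | cons p rest ih =>
      obtain ⟨a, b⟩ := p
      rw [PySem.Dict.get?_mk_cons]
      simp [pvAlook, ih]

theorem pvCanon_get?_eq (x : String) :
    pvCanon.get? x = pvAlook (pvFlat pvSubjectMapping) x := by
  have h : pvCanon = PySem.Dict.mk (pvFlat pvSubjectMapping) := by decide
  rw [h, pvGet?_eq_alook]

theorem pvAlook_map_self (k : String) (vs : List String) (l : List (String × String))
    (x : String) (h : vs.contains x = true) :
    pvAlook (vs.map (fun v => (v, k)) ++ l) x = some k := by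
  induction vs with
  | nil => simp at h
  | cons v rest ih =>
      simp only [List.map_cons, List.cons_append, pvAlook]
      by_cases hv : v = x
      · simp [hv]
      · rw [if_neg (by simpa using hv)]
        simp only [List.contains_cons, Bool.or_eq_true, beq_iff_eq] at h
        rcases h with h | h
        · exact absurd h.symm hv
        · exact ih h

theorem pvAlook_map_skip (k : String) (vs : List String) (l : List (String × String))
    (x : String) (h : vs.contains x = false) :
    pvAlook (vs.map (fun v => (v, k)) ++ l) x = pvAlook l x := by
  induction vs with
  | nil => simp
  | cons v rest ih =>
      simp only [List.contains_cons, Bool.or_eq_false_iff, beq_eq_false_iff_ne] at h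
      simp only [List.map_cons, List.cons_append, pvAlook]
      rw [if_neg (by simpa using (Ne.symm h.1)),
          ih (by simpa [List.contains_eq_mem] using h.2)]

-- a successful lookup in pvFlat m returns one of m's canonical keys …
theorem pvAlook_flat_mem_keys (m : List (String × List String)) (x c : String)
    (h : pvAlook (pvFlat m) x = some c) : c ∈ m.map (·.1) := by
  induction m with
  | nil => simp [pvFlat, pvAlook] at h
  | cons kv rest ih =>
      obtain ⟨k, vs⟩ := kv
      rw [pvFlat_cons] at h
      by_cases hc : vs.contains x = true
      · rw [pvAlook_map_self k vs _ x hc] at h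
        simp at h
        simp [h]
      · rw [pvAlook_map_skip k vs _ x (by simpa using hc)] at h
        simpa using Or.inr (ih h)

-- … and only finds strings that occur among m's variations
theorem pvAlook_flat_mem_vars (m : List (String × List String)) (x c : String)
    (h : pvAlook (pvFlat m) x = some c) : x ∈ m.flatMap (·.2) := by
  induction m with
  | nil => simp [pvFlat, pvAlook] at h
  | cons kv rest ih =>
      obtain ⟨k, vs⟩ := kv
      rw [pvFlat_cons] at h
      by_cases hc : vs.contains x = true
      · simp only [List.flatMap_cons, List.mem_append]
        exact Or.inl (by simpa [List.contains_eq_mem] using hc)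
      · rw [pvAlook_map_skip k vs _ x (by simpa using hc)] at h
        simp only [List.flatMap_cons, List.mem_append]
        exact Or.inr (ih h)

theorem pvAlook_flat_none (m : List (String × List String)) (x : String)
    (h : x ∉ m.flatMap (·.2)) : pvAlook (pvFlat m) x = none := by
  cases hc : pvAlook (pvFlat m) x with
  | none => rfl
  | some c => exact absurd (pvAlook_flat_mem_vars m x c hc) h

-- main bridge: A's scanning loop equals B's two reverse lookups, given that the
-- canonical keys are distinct and the variation lists are pairwise disjoint
theorem pvLoop_eq_lookup (m : List (String × List String)) (tn rn : String)
    (hk : (m.map (·.1)).Nodup) (hv : (m.flatMap (·.2)).Nodup) :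
    pvLoopA m tn rn =
      ((match pvAlook (pvFlat m) tn with
        | some c => pvAlook (pvFlat m) rn == some c
        | none => false) || tn == rn) := by
  induction m with
  | nil => simp [pvLoopA, pvFlat, pvAlook]
  | cons kv rest ih =>
      obtain ⟨k, vs⟩ := kv
      simp only [List.map_cons, List.nodup_cons] at hk
      simp only [List.flatMap_cons, List.nodup_append] at hv
      obtain ⟨hknotin, hkrest⟩ := hk
      obtain ⟨-, hvrest, hdisj⟩ := hv
      have hrest := ih hkrest hvrest
      -- disjointness: any string in vs is absent from the later variation lists
      have habsent : ∀ y : String, vs.contains y = true → y ∉ rest.flatMap (·.2) := by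
        intro y hy hmem
        exact hdisj y (by simpa [List.contains_eq_mem] using hy) y hmem rfl
      -- a lookup in the rest never returns k (k is not among rest's keys)
      have hnotk : ∀ (y c : String), pvAlook (pvFlat rest) y = some c → ¬ (c = k) := by
        intro y c hc hck
        exact hknotin (hck ▸ pvAlook_flat_mem_keys rest y c hc)
      rw [pvFlat_cons]
      show (if vs.contains rn && vs.contains tn then true else pvLoopA rest tn rn) = _
      by_cases ht : vs.contains tn = true
      · have htn := pvAlook_map_self k vs (pvFlat rest) tn ht
        by_cases hr : vs.contains rn = true
        · rw [if_pos (by rw [ht, hr]; rfl), htn,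
              pvAlook_map_self k vs (pvFlat rest) rn hr]
          simp
        · -- tn in vs, rn not: both sides reduce to tn == rn
          rw [Bool.not_eq_true] at hr
          rw [if_neg (by intro hc; rw [hr] at hc; simp at hc), htn,
              pvAlook_map_skip k vs (pvFlat rest) rn hr, hrest,
              pvAlook_flat_none rest tn (habsent tn ht)]
          simp only [Bool.false_or]
          cases hrn : pvAlook (pvFlat rest) rn with
          | none => simp
          | some c =>
              have hne : ¬ (c = k) := hnotk rn c hrn
              simp
              exact fun h => absurd h hne
      · rw [Bool.not_eq_true] at ht
        rw [if_neg (by intro hc; rw [ht] at hc; simp at hc),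
            pvAlook_map_skip k vs (pvFlat rest) tn ht, hrest]
        by_cases hr : vs.contains rn = true
        · -- rn in vs, tn not: again both sides reduce to tn == rn
          rw [pvAlook_map_self k vs (pvFlat rest) rn hr,
              pvAlook_flat_none rest rn (habsent rn hr)]
          cases htc : pvAlook (pvFlat rest) tn with
          | none => simp
          | some c =>
              have hne : ¬ (c = k) := hnotk tn c htc
              simp
              exact fun h => absurd h.symm hne
        · rw [Bool.not_eq_true] at hr
          rw [pvAlook_map_skip k vs (pvFlat rest) rn hr]

-- ===== VERDICT (by name: the statement is the Claim_ definition above) =====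
theorem subjects_match_py_spec : Claim_equal_subjects_match_py := by
  intro t r _
  unfold Spec_subjects_match_py subjects_match_py subjects_match_py_alt
  simp only [pvCanon_get?_eq]
  exact pvLoop_eq_lookup pvSubjectMapping _ _ (by decide) (by decide)
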